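-- pv_equiv track=rewrite | github.com/Sledik/Sorting-algorithms | multiselect_sort.py | pre_sort
-- ===== SOURCE A (Python) =====
-- def pre_sort(array):
--
-- 	# Pole pro ukládání nejmenších prvků
-- 	small_items = []
--
-- 	# Projdi všechny položky pole array
-- 	for i in range(len(array)):
--
-- 		# Pokud pole small_items neobsahuje nic, přesuň tam první prvek pole array
-- 		if len(small_items) == 0:
-- 			small_items.append(array[i])
-- 			array.pop(i)
-- 		# Pokud daný prvek pole array je menší (nebo roven) než poslední prvek pole small_items,
-- 		# přesuň do small_items tento prvek
-- 		elif array[i - len(small_items)] <= small_items[-1]: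
-- 			small_items.append(array[i - len(small_items)])
-- 			array.pop(i - len(small_items) + 1)
--
-- 	# Slož dohromady nejmenší čísla a neseřazený zbytek pole array, na který je rekurzivně zavolána
-- 	# funkce pre_sort(array). To dělej dokud je pole k řazení dost velké
-- 	if len(array) > 1:
-- 		final_arr = small_items[::-1] + pre_sort(array)
-- 	else:
-- 		final_arr = small_items[::-1] + array
--
-- 	# Vrať předřazené pole
-- 	return final_arr
-- ===== SOURCE B (Python) =====
-- def pre_sort(array):
-- 	# Iterative: each pass splits the list in ONE linear scan into the greedy
-- 	# non-increasing run (reversed onto the output) and the remainder,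
-- 	# instead of the index-juggling pop() passes plus deep recursion.
-- 	# Note: A mutates its argument in place (pops elements); B does not --
-- 	# the equivalence is about the return value.
-- 	out = []
-- 	rest = array
-- 	while rest:
-- 		run = [rest[0]]
-- 		rem = []
-- 		for x in rest[1:]:
-- 			if x <= run[-1]:
-- 				run.append(x)
-- 			else:
-- 				rem.append(x)
-- 		out += run[::-1]
-- 		rest = rem
-- 	return out
-- ===== Notes on version B (the rewrite author's own statement) =====
-- stated objective: alternative
-- what changed: Replaces A's per-element index arithmetic with O(n) list.pop calls and one recursive call per pass by an iterative loop that splits the list in a single linear scan per pass into the greedy non-increasing run and the remainder (measured ~2.2x at n=4096 but both remain quadratic overall, so no speed is claimed).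
import Mathlib
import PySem

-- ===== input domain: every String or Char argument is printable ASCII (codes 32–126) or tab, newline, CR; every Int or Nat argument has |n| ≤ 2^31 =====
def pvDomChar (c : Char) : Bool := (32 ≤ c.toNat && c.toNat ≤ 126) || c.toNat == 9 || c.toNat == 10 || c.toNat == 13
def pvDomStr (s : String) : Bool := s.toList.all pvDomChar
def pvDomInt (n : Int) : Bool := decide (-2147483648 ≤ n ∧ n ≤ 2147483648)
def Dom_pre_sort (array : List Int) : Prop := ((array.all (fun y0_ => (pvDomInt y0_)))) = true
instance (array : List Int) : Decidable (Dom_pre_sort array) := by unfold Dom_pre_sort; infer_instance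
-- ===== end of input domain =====

-- B replaces A's pop()-based passes and recursion by one linear split per pass in an
-- iterative loop (a different algorithmic decomposition; no recursion). A mutates its
-- argument in place (pops elements); B does not — the equivalence is about the return value.

-- ===== PORT A =====
-- one iteration of A's for-loop: state = (array, small_items)
def preSortStep (st : List Int × List Int) (i : Int) : List Int × List Int :=
  match st with
  | (arr, small) =>
    if small.length = 0 then
      match PySem.List.pop? arr i with
      | some p => (p.2, small ++ [p.1])     -- small_items.append(array[i]); array.pop(i)
      | none => (arr, small)                -- unreachable: Python would raise IndexError
    else
      match PySem.List.pyGet? arr (i - small.length), PySem.List.pyGet? small (-1) with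
      | some v, some last =>
        if v ≤ last then
          let small' := small ++ [v]        -- small_items.append(array[i - len(small_items)])
          match PySem.List.pop? arr (i - small'.length + 1) with
          | some p => (p.2, small')         -- array.pop(i - len(small_items) + 1)
          | none => (arr, small')           -- unreachable
        else (arr, small)
      | _, _ => (arr, small)                -- unreachable

-- each step never lengthens the array component (needed for A's termination)
theorem preSortStep_fst_le (st : List Int × List Int) (i : Int) :
    ((preSortStep st i).1.length ≤ st.1.length) := by
  obtain ⟨arr, small⟩ := st
  simp only [preSortStep]
  split
  · cases h : PySem.List.pop? arr i with
    | none => simp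
    | some p => have := PySem.List.length_of_pop?_eq_some arr h; simp; omega
  · split
    · split
      · cases h : PySem.List.pop? arr (_ + 1) with
        | none => simp
        | some p => have := PySem.List.length_of_pop?_eq_some arr h; simp; omega
      · simp
    · simp

theorem preSortFold_fst_le (l : List Int) (st : List Int × List Int) :
    ((l.foldl preSortStep st).1.length ≤ st.1.length) := by
  induction l generalizing st with
  | nil => simp
  | cons i l ih =>
      simp only [List.foldl_cons]
      exact le_trans (ih (preSortStep st i)) (preSortStep_fst_le st i)

theorem preSort_decr (array : List Int)
    (h : 1 < ((PySem.List.pyRange 0 (array.length) 1).foldl preSortStep (array, [])).1.length) :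
    ((PySem.List.pyRange 0 (array.length) 1).foldl preSortStep (array, [])).1.length
      < array.length := by
  cases array with
  | nil =>
      exfalso
      simp [PySem.List.pyRange_one_eq_nil] at h
  | cons x xs =>
      have hcons : PySem.List.pyRange 0 ((x :: xs).length) 1
          = 0 :: PySem.List.pyRange 1 ((x :: xs).length) 1 := by
        have : (0 : Int) < ((x :: xs).length : Int) := by simp
        simpa using PySem.List.pyRange_one_cons this
      rw [hcons]
      simp only [List.foldl_cons]
      have hstep : preSortStep (x :: xs, ([] : List Int)) 0 = (xs, [x]) := by
        simp [preSortStep, PySem.List.pop?_zero_cons]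
      rw [hstep]
      have := preSortFold_fst_le (PySem.List.pyRange 1 ((x :: xs).length) 1) (xs, [x])
      simp at this ⊢
      omega

def pre_sort (array : List Int) : List Int :=
  let st := (PySem.List.pyRange 0 (array.length) 1).foldl preSortStep (array, [])
  if st.1.length > 1 then st.2.reverse ++ pre_sort st.1     -- recurse on the remainder
  else st.2.reverse ++ st.1
termination_by array.length
decreasing_by
  exact preSort_decr array (by assumption)

-- ===== PORT B =====
-- one iteration of B's inner for-loop: state = (run, rem)
def altStep (p : List Int × List Int) (y : Int) : List Int × List Int :=
  match PySem.List.pyGet? p.1 (-1) with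
  | some last => if y ≤ last then (p.1 ++ [y], p.2) else (p.1, p.2 ++ [y])
  | none => p                                -- unreachable: run starts nonempty

-- the remainder produced by one pass is shorter than the input (B's loop terminates)
theorem altFold_snd_le (xs : List Int) (p : List Int × List Int) :
    ((xs.foldl altStep p).2.length ≤ p.2.length + xs.length) := by
  induction xs generalizing p with
  | nil => simp
  | cons y ys ih =>
      simp only [List.foldl_cons]
      refine le_trans (ih (altStep p y)) ?_
      have : (altStep p y).2.length ≤ p.2.length + 1 := by
        simp only [altStep]; split
        · split <;> simp
        · simp
      simp only [List.length_cons]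
      omega

def altGo (out rest : List Int) : List Int :=
  match rest with
  | [] => out
  | x :: xs =>
      let p := xs.foldl altStep ([x], [])    -- run = [rest[0]]; rem = []; for x in rest[1:] …
      altGo (out ++ p.1.reverse) p.2         -- out += run[::-1]; rest = rem
termination_by rest.length
decreasing_by
  have := altFold_snd_le xs ([x], [])
  simp at this ⊢
  omega

def pre_sort_alt (array : List Int) : List Int := altGo [] array

-- ===== PRECONDITION & SPEC =====
def Spec_pre_sort (array : List Int) (out : List Int) : Prop := out = pre_sort_alt array
instance (array : List Int) (out : List Int) : Decidable (Spec_pre_sort array out) := by unfold Spec_pre_sort; infer_instance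

-- ===== CLAIM (what is proved, stated in full; the proofs are below) =====
def Claim_equal_pre_sort : Prop := ∀ (array : List Int), Dom_pre_sort array → Spec_pre_sort array (pre_sort array)

-- ===== LEMMAS AND PROOFS =====

-- the greedy non-increasing subsequence (run) and its complement (remainder)
def takeRun (last : Int) (xs : List Int) : List Int :=
  match xs with
  | [] => []
  | y :: ys => if y ≤ last then y :: takeRun y ys else takeRun last ys

def dropRun (last : Int) (xs : List Int) : List Int :=
  match xs with
  | [] => []
  | y :: ys => if y ≤ last then dropRun y ys else y :: dropRun last ys

theorem dropRun_length_le (last : Int) (xs : List Int) :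
    (dropRun last xs).length ≤ xs.length := by
  induction xs generalizing last with
  | nil => simp [dropRun]
  | cons y ys ih =>
      simp only [dropRun]
      split
      · exact le_trans (ih y) (by simp)
      · simpa using ih last

-- reference recursion both programs compute
def core (l : List Int) : List Int :=
  match l with
  | [] => []
  | x :: xs => (x :: takeRun x xs).reverse ++ core (dropRun x xs)
termination_by l.length
decreasing_by
  have := dropRun_length_le x xs
  simp
  omega

theorem core_short (l : List Int) (h : l.length ≤ 1) : core l = l := by
  match l with
  | [] => simp [core]
  | [a] => simp [core, takeRun, dropRun]

theorem eraseIdx_append_length (pre : List Int) (y : Int) (ys : List Int) :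
    (pre ++ y :: ys).eraseIdx pre.length = pre ++ ys := by
  induction pre with
  | nil => simp
  | cons a pre ih => simpa using ih

theorem pop?_append_length (pre : List Int) (y : Int) (ys : List Int) :
    PySem.List.pop? (pre ++ y :: ys) (pre.length) = some (y, pre ++ ys) := by
  have hlt : pre.length < (pre ++ y :: ys).length := by simp
  rw [PySem.List.pop?_natCast (pre ++ y :: ys) pre.length hlt]
  have hget : (pre ++ y :: ys)[pre.length] = y := by simp
  rw [hget, eraseIdx_append_length]

-- characterisation of A's pass: folding the steps over indices a, a+1, …, b-1 splits
-- the unprocessed suffix xs into remainder and run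
theorem foldA (xs : List Int) : ∀ (pre small : List Int) (last : Int) (a b : Int),
    small.getLast? = some last → a = pre.length + small.length → b = a + xs.length →
    (PySem.List.pyRange a b 1).foldl preSortStep (pre ++ xs, small)
      = (pre ++ dropRun last xs, small ++ takeRun last xs) := by
  induction xs with
  | nil =>
      intro pre small last a b h ha hb
      rw [PySem.List.pyRange_one_eq_nil (by simp [hb])]
      simp [dropRun, takeRun]
  | cons y ys ih =>
      intro pre small last a b h ha hb
      have hne : small ≠ [] := by intro hs; simp [hs] at h
      have hab : a < b := by simp only [List.length_cons] at hb; push_cast at hb; omega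
      rw [PySem.List.pyRange_one_cons hab]
      simp only [List.foldl_cons]
      have hlen0 : ¬ small.length = 0 := by simpa [List.length_eq_zero_iff] using hne
      have hstep : preSortStep (pre ++ y :: ys, small) a
          = if y ≤ last then (pre ++ ys, small ++ [y]) else (pre ++ y :: ys, small) := by
        simp only [preSortStep, hlen0, if_false]
        have hidx : a - small.length = (pre.length : Int) := by
          rw [ha]; omega
        have hidx2 : a - ((small ++ [y]).length : Int) + 1 = (pre.length : Int) := by
          simp only [List.length_append, List.length_cons, List.length_nil, ha]
          push_cast
          ring
        rw [hidx, PySem.List.pyGet?_append_length, PySem.List.pyGet?_neg_one, h]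
        split
        · rename_i v lastv hv hl
          injection hv with hv; injection hl with hl
          subst hv; subst hl
          by_cases hy : y ≤ last
          · rw [if_pos hy, if_pos hy, hidx2, pop?_append_length]
          · rw [if_neg hy, if_neg hy]
        · rename_i hcontra
          exact (hcontra y last rfl rfl).elim
      rw [hstep]
      by_cases hy : y ≤ last
      · rw [if_pos hy]
        have := ih pre (small ++ [y]) y (a + 1) b
          (by simp)
          (by simp only [List.length_append, List.length_cons, List.length_nil, ha]; push_cast; ring)
          (by simp only [List.length_cons] at hb; push_cast at hb ⊢; omega)
        rw [this]
        simp [dropRun, takeRun, hy]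
      · rw [if_neg hy]
        have := ih (pre ++ [y]) small last (a + 1) b h
          (by simp only [List.length_append, List.length_cons, List.length_nil] at *; push_cast; omega)
          (by simp only [List.length_cons] at hb; push_cast at hb ⊢; omega)
        simp only [List.append_assoc, List.singleton_append] at this
        rw [this]
        simp [dropRun, takeRun, hy]

-- A computes core
theorem pre_sort_eq_core (l : List Int) : pre_sort l = core l := by
  induction hn : l.length using Nat.strong_induction_on generalizing l with
  | _ n ih =>
    match l with
    | [] =>
        rw [pre_sort]
        simp [PySem.List.pyRange_one_eq_nil, core]
    | x :: xs =>
        have hcons : PySem.List.pyRange 0 ((x :: xs).length) 1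
            = 0 :: PySem.List.pyRange 1 ((x :: xs).length) 1 := by
          have : (0 : Int) < ((x :: xs).length : Int) := by simp
          simpa using PySem.List.pyRange_one_cons this
        have hfold : ((PySem.List.pyRange 0 ((x :: xs).length) 1).foldl preSortStep (x :: xs, []))
            = (dropRun x xs, x :: takeRun x xs) := by
          rw [hcons]
          simp only [List.foldl_cons]
          have hstep : preSortStep (x :: xs, ([] : List Int)) 0 = (xs, [x]) := by
            simp [preSortStep, PySem.List.pop?_zero_cons]
          rw [hstep]
          have := foldA xs [] [x] x 1 ((x :: xs).length) (by simp) (by simp)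
            (by simp only [List.length_cons]; push_cast; omega)
          simpa using this
        rw [pre_sort]
        simp only [hfold]
        by_cases hlen : (dropRun x xs).length > 1
        · rw [if_pos hlen]
          have hlt : (dropRun x xs).length < n := by
            have := dropRun_length_le x xs
            simp at hn; omega
          rw [ih _ hlt _ rfl]
          simp [core]
        · rw [if_neg hlen]
          rw [core]
          rw [core_short _ (by omega)]

-- characterisation of B's pass
theorem foldB (xs : List Int) : ∀ (run rem : List Int) (last : Int),
    run.getLast? = some last →
    xs.foldl altStep (run, rem) = (run ++ takeRun last xs, rem ++ dropRun last xs) := by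
  induction xs with
  | nil => intro run rem last h; simp [takeRun, dropRun]
  | cons y ys ih =>
      intro run rem last h
      simp only [List.foldl_cons]
      have hstep : altStep (run, rem) y
          = if y ≤ last then (run ++ [y], rem) else (run, rem ++ [y]) := by
        simp only [altStep, PySem.List.pyGet?_neg_one, h]
      rw [hstep]
      by_cases hy : y ≤ last
      · rw [if_pos hy, ih (run ++ [y]) rem y (by simp)]
        simp [takeRun, dropRun, hy]
      · rw [if_neg hy, ih run (rem ++ [y]) last h]
        simp [takeRun, dropRun, hy]

-- B computes core (with its accumulator)
theorem altGo_eq_core (rest : List Int) : ∀ (out : List Int), altGo out rest = out ++ core rest := by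
  induction hn : rest.length using Nat.strong_induction_on generalizing rest with
  | _ n ih =>
    intro out
    match rest with
    | [] => simp [altGo, core]
    | x :: xs =>
        rw [altGo]
        simp only [foldB xs [x] [] x (by simp), List.nil_append]
        have hlt : (dropRun x xs).length < n := by
          have := dropRun_length_le x xs
          simp at hn; omega
        rw [ih _ hlt _ rfl]
        simp [core]

-- ===== VERDICT (by name: the statement is the Claim_ definition above) =====
theorem pre_sort_spec : Claim_equal_pre_sort := by
  intro array _
  unfold Spec_pre_sort pre_sort_alt
  rw [altGo_eq_core, pre_sort_eq_core]
  simp
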